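-- pv_equiv track=rewrite | github.com/mpinb/in_silico_framework | project_specific_ipynb_code/biophysical_models/visualization.py | get_new_params_name_mapping
-- ===== SOURCE A (Python) =====
-- from copy import deepcopy
--
-- def get_new_params_name_mapping(old_mapping):
--     #Ca v2
--     ca_keys_v2_list = [key.split('.') for key in old_mapping.keys() if 'CaDynamics_E2' in key]
--     ca_keys = [key for key in old_mapping.keys() if 'CaDynamics_E2' in key]
--     for list_ in ca_keys_v2_list:
--         list_[1] = 'CaDynamics_E2_v2'
--     ca_keys_v2 = [('.').join(list_) for list_ in ca_keys_v2_list]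
--
--     new_mapping = deepcopy(old_mapping)
--     for old_key, new_key in zip(ca_keys, ca_keys_v2):
--         new_mapping[new_key] = new_mapping[old_key]
--         del new_mapping[old_key]
--
--     #add Ih
--     new_mapping['ephys.Ih.apic.linScale'] = 'a.Ih_linScale'
--     new_mapping['ephys.Ih.apic.max_g'] = 'a.Ih_max'
--
--     return new_mapping
-- ===== SOURCE B (Python) =====
-- from copy import deepcopy
--
-- def get_new_params_name_mapping(old_mapping):
--     # Build the new mapping from scratch in two passes instead of
--     # deepcopying and renaming in place: first the untouched keys,
--     # then the renamed CaDynamics keys, then the two fixed Ih entries.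
--     new_mapping = {}
--     for key, value in old_mapping.items():
--         if 'CaDynamics_E2' not in key:
--             new_mapping[key] = deepcopy(value)
--     for key, value in old_mapping.items():
--         if 'CaDynamics_E2' in key:
--             parts = key.split('.')
--             parts[1] = 'CaDynamics_E2_v2'
--             new_mapping['.'.join(parts)] = deepcopy(value)
--     new_mapping['ephys.Ih.apic.linScale'] = 'a.Ih_linScale'
--     new_mapping['ephys.Ih.apic.max_g'] = 'a.Ih_max'
--     return new_mapping
-- ===== Notes on version B (the rewrite author's own statement) =====
-- stated objective: simpler
-- what changed: B builds the new mapping from scratch in two passes (untouched keys first, then renamed CaDynamics keys, then the two Ih entries) instead of deepcopying the whole dict and renaming keys in place via parallel key lists, zip, insert and delete.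
import Mathlib
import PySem

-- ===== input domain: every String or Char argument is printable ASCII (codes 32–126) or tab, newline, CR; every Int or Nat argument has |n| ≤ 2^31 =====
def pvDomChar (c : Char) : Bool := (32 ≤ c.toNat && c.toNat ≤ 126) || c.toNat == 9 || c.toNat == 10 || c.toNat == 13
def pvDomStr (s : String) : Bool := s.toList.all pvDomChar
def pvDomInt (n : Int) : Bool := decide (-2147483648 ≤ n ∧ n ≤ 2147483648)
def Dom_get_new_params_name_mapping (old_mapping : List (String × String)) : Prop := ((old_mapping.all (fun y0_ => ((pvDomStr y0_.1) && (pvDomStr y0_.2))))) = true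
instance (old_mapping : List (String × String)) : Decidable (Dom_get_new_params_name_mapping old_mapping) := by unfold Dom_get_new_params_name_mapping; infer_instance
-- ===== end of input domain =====

-- B rebuilds the mapping from scratch in two passes instead of A's deepcopy-and-rename-in-place;
-- the equivalence is about the return value (neither program mutates its argument).

-- ===== PORT A =====
def get_new_params_name_mapping (old_mapping : List (String × String)) : List (String × String) :=
  let old_d := PySem.Dict.ofList old_mapping
  let ca_keys_v2_list :=
    (old_d.keys.filter (fun key => PySem.Str.isIn "CaDynamics_E2" key)).map
      (fun key => (PySem.Str.split? key ".").getD [])  -- '.' ≠ "", so split? is always `some`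
  let ca_keys := old_d.keys.filter (fun key => PySem.Str.isIn "CaDynamics_E2" key)
  -- for list_ in ca_keys_v2_list: list_[1] = 'CaDynamics_E2_v2'  (pySetD is exact under Pre_, which excludes the IndexError)
  let ca_keys_v2_list := ca_keys_v2_list.map (fun list_ => PySem.List.pySetD list_ 1 "CaDynamics_E2_v2")
  let ca_keys_v2 := ca_keys_v2_list.map (fun list_ => PySem.Str.join "." list_)
  let new_mapping := old_d  -- deepcopy
  -- new_mapping[old_key] is always present here (dict keys are distinct and only already-processed
  -- old keys have been deleted), so getD's default is never used
  let new_mapping := (ca_keys.zip ca_keys_v2).foldl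
    (fun nm p => (nm.insert p.2 (nm.getD p.1 "")).erase p.1) new_mapping
  let new_mapping := new_mapping.insert "ephys.Ih.apic.linScale" "a.Ih_linScale"
  let new_mapping := new_mapping.insert "ephys.Ih.apic.max_g" "a.Ih_max"
  new_mapping.items

-- ===== PORT B =====
def get_new_params_name_mapping_alt (old_mapping : List (String × String)) : List (String × String) :=
  let old_d := PySem.Dict.ofList old_mapping
  let new_mapping := old_d.items.foldl
    (fun nm p => if PySem.Str.isIn "CaDynamics_E2" p.1 then nm else nm.insert p.1 p.2)
    PySem.Dict.empty
  let new_mapping := old_d.items.foldl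
    (fun nm p => if PySem.Str.isIn "CaDynamics_E2" p.1 then
        nm.insert
          (PySem.Str.join "."
            (PySem.List.pySetD ((PySem.Str.split? p.1 ".").getD []) 1 "CaDynamics_E2_v2"))
          p.2
      else nm)
    new_mapping
  let new_mapping := new_mapping.insert "ephys.Ih.apic.linScale" "a.Ih_linScale"
  let new_mapping := new_mapping.insert "ephys.Ih.apic.max_g" "a.Ih_max"
  new_mapping.items

-- ===== PRECONDITION & SPEC =====
-- Pre_ excludes (i) the inputs on which A raises: a key containing 'CaDynamics_E2' but no '.'
-- makes `list_[1] = …` raise IndexError (B raises there too); and (ii) mappings that already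
-- contain a key whose second dot-component is 'CaDynamics_E2_v2': there the rename target
-- collides with an existing key, and whether the colliding entry survives, and where, is an
-- accident of dict insert/delete order (A drops or moves it, B keeps it in place).
def Pre_get_new_params_name_mapping (old_mapping : List (String × String)) : Prop :=
  (∀ p ∈ old_mapping, PySem.Str.isIn "CaDynamics_E2" p.1 = true →
    2 ≤ ((PySem.Str.split? p.1 ".").getD []).length) ∧
  (∀ p ∈ old_mapping, ¬(2 ≤ (p.1.toList.splitOn '.').length ∧
    (p.1.toList.splitOn '.').getD 1 [] = "CaDynamics_E2_v2".toList))
instance (old_mapping : List (String × String)) : Decidable (Pre_get_new_params_name_mapping old_mapping) := by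
  unfold Pre_get_new_params_name_mapping; infer_instance
def pvWitness_get_new_params_name_mapping : (List (String × String)) :=
  [("ephys.CaDynamics_E2.soma.gamma", "s.gamma"), ("ephys.none.soma.g", "s.g")]

def Spec_get_new_params_name_mapping (old_mapping : List (String × String)) (out : List (String × String)) : Prop :=
  out = get_new_params_name_mapping_alt old_mapping
instance (old_mapping : List (String × String)) (out : List (String × String)) : Decidable (Spec_get_new_params_name_mapping old_mapping out) := by
  unfold Spec_get_new_params_name_mapping; infer_instance

-- ===== CLAIM (what is proved, stated in full; the proofs are below) =====
def Claim_equal_get_new_params_name_mapping : Prop := ∀ (old_mapping : List (String × String)), Dom_get_new_params_name_mapping old_mapping → Pre_get_new_params_name_mapping old_mapping → Spec_get_new_params_name_mapping old_mapping (get_new_params_name_mapping old_mapping)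

-- ===== LEMMAS AND PROOFS =====

-- the 'CaDynamics_E2' membership test and the key-rename, as used by both programs
def pvCa (k : String) : Bool := PySem.Str.isIn "CaDynamics_E2" k
def pvRen (k : String) : String :=
  PySem.Str.join "." (PySem.List.pySetD ((PySem.Str.split? k ".").getD []) 1 "CaDynamics_E2_v2")

-- ---- string layer ----
theorem pv_go_spec : ∀ (fuel : Nat) (l cur : List Char) (acc : List (List Char)), l.length < fuel →
    PySem.Chars.splitOn.go ['.'] fuel l cur acc
      = acc.reverse ++ (List.splitOnP (· == '.') l).modifyHead (cur.reverse ++ ·) := by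
  intro fuel
  induction fuel with
  | zero => intro l cur acc h; omega
  | succ f ih =>
    intro l cur acc h
    cases l with
    | nil =>
      rw [PySem.Chars.splitOn.go]
      · simp
      · omega
    | cons c rest =>
      rw [PySem.Chars.splitOn.go]
      by_cases hc : c = '.'
      · have hpre : ['.'].isPrefixOf (c :: rest) = true := by simp [List.isPrefixOf, hc]
        rw [if_pos hpre]
        rw [show List.drop (['.'].length) (c :: rest) = rest from rfl]
        rw [ih rest [] (cur.reverse :: acc) (by simpa using Nat.lt_of_succ_lt_succ h)]
        have hmid : ∀ (L : List (List Char)), List.modifyHead (fun x : List Char => x) L = L := by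
          intro L; cases L <;> rfl
        simp [hc, hmid]
      · have hpre : ['.'].isPrefixOf (c :: rest) = false := by
          simp [List.isPrefixOf]; exact fun h => hc h.symm
        rw [if_neg (by simp [hpre])]
        rw [ih rest (c :: cur) acc (by simpa using Nat.lt_of_succ_lt_succ h)]
        have hne := List.splitOnP_ne_nil (fun x => x == '.') rest
        rcases h' : List.splitOnP (fun x => x == '.') rest with _ | ⟨hd, tl⟩
        · exact absurd h' hne
        · simp [List.splitOnP_cons, hc, h']

theorem pv_splitOn_eq (s : List Char) : PySem.Chars.splitOn s ['.'] = List.splitOn '.' s := by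
  unfold PySem.Chars.splitOn
  rw [pv_go_spec (s.length + 1) s [] [] (by omega)]
  have hmid2 : ∀ (L : List (List Char)), List.modifyHead (fun x : List Char => x) L = L := by
    intro L; cases L <;> rfl
  simp [List.splitOn, hmid2]

theorem pv_split_parts (k : String) :
    (PySem.Str.split? k ".").getD [] = (k.toList.splitOn '.').map String.ofList := by
  have hsep : (".".toList) = ['.'] := by decide
  simp [PySem.Str.split?, PySem.Chars.split?, hsep, pv_splitOn_eq]

theorem pv_splitOnP_pieces (p : Char → Bool) (xs : List Char) :
    ∀ l ∈ List.splitOnP p xs, ∀ x ∈ l, p x = false := by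
  induction xs with
  | nil => intro l hl x hx; simp at hl; subst hl; simp at hx
  | cons c rest ih =>
    intro l hl x hx
    rw [List.splitOnP_cons] at hl
    by_cases hc : p c
    · rw [if_pos hc] at hl
      rcases List.mem_cons.1 hl with h1 | h2
      · subst h1; simp at hx
      · exact ih l h2 x hx
    · rw [if_neg hc] at hl
      rcases h' : List.splitOnP p rest with _ | ⟨hd, tl⟩
      · exact absurd h' (List.splitOnP_ne_nil p rest)
      · rw [h'] at hl
        simp only [List.modifyHead_cons] at hl
        rcases List.mem_cons.1 hl with h1 | h2
        · subst h1
          rcases List.mem_cons.1 hx with h3 | h4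
          · subst h3; exact eq_false_of_ne_true hc
          · exact ih hd (h' ▸ List.mem_cons_self) x h4
        · exact ih l (h' ▸ List.mem_cons_of_mem hd h2) x hx

theorem pv_pySetD_set {α : Type} (l : List α) (v : α) (h : 2 ≤ l.length) :
    PySem.List.pySetD l 1 v = l.set 1 v := by
  have h1 : (1:Int) < (l.length : Int) := by exact_mod_cast h
  simp [PySem.List.pySetD, PySem.List.pySet?, PySem.List.pyIdx?, h1]

theorem pv_ren_split (k : String) (h2 : 2 ≤ ((PySem.Str.split? k ".").getD []).length) :
    (PySem.Str.split? (pvRen k) ".").getD []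
      = ((PySem.Str.split? k ".").getD []).set 1 "CaDynamics_E2_v2" := by
  have hparts := pv_split_parts k
  set P := k.toList.splitOn '.' with hP
  have hlen : 2 ≤ P.length := by
    rw [hparts, List.length_map] at h2; exact h2
  have hren : (pvRen k).toList = ['.'].intercalate (P.set 1 ("CaDynamics_E2_v2".toList)) := by
    rw [pvRen, pv_pySetD_set _ _ h2, hparts]
    rw [PySem.Str.join]
    rw [String.toList_ofList]
    rw [PySem.Chars.join]
    congr 1
    rw [← List.map_set]
    rw [List.map_map]
    have : (String.toList ∘ String.ofList) = id := by funext l; simp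
    simp [this]
  have hfree : ∀ l ∈ P.set 1 ("CaDynamics_E2_v2".toList), '.' ∉ l := by
    intro l hl
    rcases List.mem_or_eq_of_mem_set hl with h1 | h1
    · intro hx
      have := pv_splitOnP_pieces (fun x => x == '.') k.toList l h1 '.' hx
      simp at this
    · subst h1; decide
  have hne : P.set 1 ("CaDynamics_E2_v2".toList) ≠ [] := by
    intro h0
    have hl0 : P.length = 0 := by
      have := congrArg List.length h0
      simpa using this
    omega
  rw [pv_split_parts (pvRen k), hren,
    List.splitOn_intercalate (ls := P.set 1 ("CaDynamics_E2_v2".toList)) '.' hfree hne]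
  rw [hparts, List.map_set]
  simp

theorem pv_D_shape (k : String) (h2 : 2 ≤ ((PySem.Str.split? k ".").getD []).length) :
    2 ≤ ((pvRen k).toList.splitOn '.').length ∧
    ((pvRen k).toList.splitOn '.').getD 1 [] = "CaDynamics_E2_v2".toList := by
  have hr := pv_ren_split k h2
  rw [pv_split_parts k] at hr h2
  rw [pv_split_parts (pvRen k)] at hr
  rw [List.length_map] at h2
  have hlen : ((pvRen k).toList.splitOn '.').length = (k.toList.splitOn '.').length := by
    have := congrArg List.length hr
    simpa using this
  refine ⟨by omega, ?_⟩
  have h1l : 1 < (((k.toList.splitOn '.').map String.ofList).set 1 "CaDynamics_E2_v2").length := by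
    simp; omega
  have hget : (((pvRen k).toList.splitOn '.').map String.ofList)[1]? = some "CaDynamics_E2_v2" := by
    rw [hr]
    exact List.getElem?_set_self (by simpa using h1l)
  rw [List.getElem?_map] at hget
  rcases Option.map_eq_some_iff.1 hget with ⟨x, hx1, hx2⟩
  have hx3 : x = "CaDynamics_E2_v2".toList := by
    have := congrArg String.toList hx2
    simpa [String.toList_ofList] using this
  rw [List.getD_eq_getElem?_getD, hx1]
  simpa using hx3

-- ---- dict layer ----
theorem pv_mem_items_update {κ ν : Type} [BEq κ] [LawfulBEq κ] (l : List (κ × ν))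
    (d : PySem.Dict κ ν) (p : κ × ν)
    (h : p ∈ (List.foldl (fun acc q => acc.insert q.1 q.2) d l).items) : p ∈ l ∨ p ∈ d.items := by
  induction l generalizing d with
  | nil => exact Or.inr h
  | cons q l ih =>
    rcases ih (d.insert q.1 q.2) h with h1 | h2
    · exact Or.inl (List.mem_cons_of_mem _ h1)
    · rcases (PySem.Dict.mem_items_insert d q.1 q.2 p).1 h2 with h3 | h4
      · exact Or.inl (by simp [h3])
      · exact Or.inr h4.1

theorem pv_mem_items_ofList {κ ν : Type} [BEq κ] [LawfulBEq κ] (m : List (κ × ν)) (p : κ × ν)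
    (h : p ∈ (PySem.Dict.ofList m).items) : p ∈ m := by
  rcases pv_mem_items_update m PySem.Dict.empty p h with h1 | h2
  · exact h1
  · simp [PySem.Dict.empty] at h2

theorem pv_foldl_skip_then {α β : Type} (c : β → Bool) (f : α → β → α) :
    ∀ (l : List β) (d : α),
      l.foldl (fun a p => if c p then a else f a p) d = (l.filter (fun p => !c p)).foldl f d := by
  intro l
  induction l with
  | nil => intro d; rfl
  | cons q l ih => intro d; by_cases h : c q <;> simp [h, ih]

theorem pv_foldl_do_then {α β : Type} (c : β → Bool) (f : α → β → α) :
    ∀ (l : List β) (d : α),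
      l.foldl (fun a p => if c p then f a p else a) d = (l.filter c).foldl f d := by
  intro l
  induction l with
  | nil => intro d; rfl
  | cons q l ih => intro d; by_cases h : c q <;> simp [h, ih]

theorem pv_insert_front {κ ν : Type} [BEq κ] [LawfulBEq κ]
    (u : List (κ × ν)) (r : PySem.Dict κ ν) (k : κ) (v : ν) (hu : ∀ p ∈ u, p.1 ≠ k) :
    (PySem.Dict.mk (u ++ r.items)).insert k v = PySem.Dict.mk (u ++ (r.insert k v).items) := by
  have hany : u.any (fun p => p.1 == k) = false := by
    simp only [List.any_eq_false]
    intro p hp; simpa using hu p hp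
  have hmapu : List.map (fun p => if (p.1 == k) = true then (k, v) else p) u = u := by
    have h2 : ∀ p ∈ u, (if (p.1 == k) = true then (k, v) else p) = p := by
      intro p hp; simp [hu p hp]
    exact (List.map_congr_left h2).trans (List.map_id u)
  by_cases hc : r.contains k
  · have hc' : r.items.any (fun p => p.1 == k) = true := hc
    simp [PySem.Dict.insert, PySem.Dict.contains, List.any_append, hany, hc', hmapu]
  · have hc0 : r.contains k = false := by simpa using hc
    have hc' : r.items.any (fun p => p.1 == k) = false := hc0
    simp [PySem.Dict.insert, PySem.Dict.contains, List.any_append, hany, hc']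

theorem pv_erase_front {κ ν : Type} [BEq κ] [LawfulBEq κ]
    (u : List (κ × ν)) (r : PySem.Dict κ ν) (k : κ) (hr : ∀ p ∈ r.items, p.1 ≠ k) :
    (PySem.Dict.mk (u ++ r.items)).erase k
      = PySem.Dict.mk (u.filter (fun p => !(p.1 == k)) ++ r.items) := by
  simp only [PySem.Dict.erase, List.filter_append]
  have hid : List.filter (fun p => !(p.1 == k)) r.items = r.items :=
    List.filter_eq_self.2 (fun p hp => by simpa using hr p hp)
  rw [hid]

theorem pv_B_push (u : List (String × String)) :
    ∀ (s : List (String × String)) (r : PySem.Dict String String),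
      (∀ q ∈ s, ∀ p ∈ u, p.1 ≠ pvRen q.1) →
      s.foldl (fun nm p => nm.insert (pvRen p.1) p.2) (PySem.Dict.mk (u ++ r.items))
        = PySem.Dict.mk (u ++ (s.foldl (fun acc p => acc.insert (pvRen p.1) p.2) r).items) := by
  intro s
  induction s with
  | nil => intro r h; rfl
  | cons q s ih =>
    intro r h
    simp only [List.foldl_cons]
    rw [pv_insert_front u r (pvRen q.1) q.2 (fun p hp => h q List.mem_cons_self p hp)]
    exact ih (r.insert (pvRen q.1) q.2) (fun q' hq' p hp => h q' (List.mem_cons_of_mem q hq') p hp)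


set_option maxHeartbeats 1000000 in
theorem pv_A_loop :
    ∀ (s front : List (String × String)) (r : PySem.Dict String String),
      front.filter (fun p => pvCa p.1) = s →
      (front.map (·.1)).Nodup →
      (∀ q ∈ s, ∀ p ∈ front, p.1 ≠ pvRen q.1) →
      (∀ k ∈ r.keys, ∀ p ∈ front, k ≠ p.1) →
      r.keys.Nodup →
      (s.map (fun p => (p.1, pvRen p.1))).foldl
          (fun nm pr => (nm.insert pr.2 (nm.getD pr.1 "")).erase pr.1)
          (PySem.Dict.mk (front ++ r.items))
        = PySem.Dict.mk (front.filter (fun p => !pvCa p.1)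
            ++ (s.foldl (fun acc p => acc.insert (pvRen p.1) p.2) r).items) := by
  intro s
  induction s with
  | nil =>
    intro front r hfs hnd hfresh hrk hrnd
    simp only [List.map_nil, List.foldl_nil]
    congr 1
    have : ∀ p ∈ front, (!pvCa p.1) = true := by
      intro p hp
      have := List.filter_eq_nil_iff.1 hfs p hp
      simpa using this
    rw [List.filter_eq_self.2 this]
  | cons q s ih =>
    intro front r hfs hnd hfresh hrk hrnd
    have hqf : q ∈ front ∧ pvCa q.1 = true := by
      have : q ∈ front.filter (fun p => pvCa p.1) := hfs ▸ List.mem_cons_self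
      exact ⟨List.mem_of_mem_filter this, by simpa using List.of_mem_filter this⟩
    -- keys of the combined dict are nodup
    have hknd : ((front ++ r.items).map (·.1)).Nodup := by
      rw [List.map_append]
      refine List.Nodup.append hnd (by simpa [PySem.Dict.keys] using hrnd) ?_
      intro k hk1 hk2
      have : k ∈ r.keys := by simpa [PySem.Dict.keys] using hk2
      rcases List.mem_map.1 hk1 with ⟨p, hp, hpk⟩
      exact hrk k this p hp hpk.symm
    have hget : (PySem.Dict.mk (front ++ r.items)).getD q.1 "" = q.2 := by
      apply PySem.Dict.getD_of_mem_items
      · exact List.mem_append_left _ hqf.1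
      · simpa [PySem.Dict.keys] using hknd
    simp only [List.map_cons, List.foldl_cons, hget]
    rw [pv_insert_front front r (pvRen q.1) q.2 (fun p hp => hfresh q List.mem_cons_self p hp)]
    rw [pv_erase_front front (r.insert (pvRen q.1) q.2) q.1 ?hr]
    case hr =>
      intro p hp
      rcases (PySem.Dict.mem_items_insert r (pvRen q.1) q.2 p).1 hp with h1 | h2
      · rw [h1]
        exact fun hh => hfresh q List.mem_cons_self q hqf.1 hh.symm
      · have : p.1 ∈ r.keys := List.mem_map_of_mem h2.1
        exact hrk p.1 this q hqf.1
    -- prepare induction hypotheses for front' and r'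
    have hkeyinj : ∀ p ∈ front, p.1 = q.1 → p = q :=
      fun p hp hpq => List.inj_on_of_nodup_map hnd hp hqf.1 hpq
    have hnods : ((q :: s).map (·.1)).Nodup := by
      rw [← hfs]; exact hnd.sublist (List.Sublist.map _ List.filter_sublist)
    have hq1 : ∀ p ∈ s, p.1 ≠ q.1 := by
      intro p hp hpq
      have hmem : q.1 ∈ s.map (·.1) := hpq ▸ List.mem_map_of_mem hp
      rw [List.map_cons] at hnods
      exact (List.nodup_cons.1 hnods).1 hmem
    have hfs' : (front.filter (fun p => !(p.1 == q.1))).filter (fun p => pvCa p.1) = s := by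
      rw [List.filter_comm, hfs]
      simp only [List.filter_cons, beq_self_eq_true, Bool.not_true]
      rw [if_neg (by simp)]
      exact List.filter_eq_self.2 (fun p hp => by simpa using hq1 p hp)
    have hnd' : ((front.filter (fun p => !(p.1 == q.1))).map (·.1)).Nodup :=
      hnd.sublist (List.Sublist.map _ List.filter_sublist)
    have hfresh' : ∀ q' ∈ s, ∀ p ∈ front.filter (fun p => !(p.1 == q.1)), p.1 ≠ pvRen q'.1 :=
      fun q' hq' p hp => hfresh q' (List.mem_cons_of_mem q hq') p (List.mem_of_mem_filter hp)
    have hrk' : ∀ k ∈ (r.insert (pvRen q.1) q.2).keys,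
        ∀ p ∈ front.filter (fun p => !(p.1 == q.1)), k ≠ p.1 := by
      intro k hk p hp
      rcases (PySem.Dict.mem_keys_insert r (pvRen q.1) k q.2).1 hk with h1 | h2
      · subst h1
        exact fun hh => hfresh q List.mem_cons_self p (List.mem_of_mem_filter hp) hh.symm
      · exact hrk k h2 p (List.mem_of_mem_filter hp)
    have hrnd' := PySem.Dict.nodup_keys_insert r (pvRen q.1) q.2 hrnd
    rw [ih (front.filter (fun p => !(p.1 == q.1))) (r.insert (pvRen q.1) q.2)
      hfs' hnd' hfresh' hrk' hrnd']
    congr 2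
    rw [List.filter_comm]
    apply List.filter_eq_self.2
    intro p hp
    have hpf : p ∈ front := List.mem_of_mem_filter hp
    have hpnca : pvCa p.1 = false := by
      have := List.of_mem_filter hp
      simpa using this
    simp only [Bool.not_eq_true']
    simp only [beq_eq_false_iff_ne, ne_eq]
    intro hpq
    have := hkeyinj p hpf hpq
    rw [this] at hpnca
    rw [hqf.2] at hpnca
    exact absurd hpnca (by simp)

-- ===== VERDICT (by name: the statement is the Claim_ definition above) =====
set_option maxHeartbeats 1000000 in
theorem get_new_params_name_mapping_spec : Claim_equal_get_new_params_name_mapping := by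
  intro m _hDom hPre
  show get_new_params_name_mapping m = get_new_params_name_mapping_alt m
  have hnd : (PySem.Dict.ofList m).keys.Nodup := PySem.Dict.nodup_keys_ofList m
  have hndi : ((PySem.Dict.ofList m).items.map (·.1)).Nodup := hnd
  have hmem : ∀ p ∈ (PySem.Dict.ofList m).items, p ∈ m :=
    fun p hp => pv_mem_items_ofList m p hp
  have hPre' : ∀ p ∈ (PySem.Dict.ofList m).items, pvCa p.1 = true →
      2 ≤ ((PySem.Str.split? p.1 ".").getD []).length :=
    fun p hp hca => hPre.1 p (hmem p hp) hca
  have hfreshAll : ∀ q ∈ (PySem.Dict.ofList m).items, pvCa q.1 = true →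
      ∀ p ∈ (PySem.Dict.ofList m).items, p.1 ≠ pvRen q.1 := by
    intro q hq hca p hp heq
    apply hPre.2 p (hmem p hp)
    rw [heq]
    exact pv_D_shape q.1 (hPre' q hq hca)
  -- shared abbreviations
  set d := PySem.Dict.ofList m with hd
  set l2 := d.items.filter (fun p => pvCa p.1) with hl2
  set l1 := d.items.filter (fun p => !pvCa p.1) with hl1
  set R := l2.foldl (fun acc p => acc.insert (pvRen p.1) p.2) PySem.Dict.empty with hR
  have hl2mem : ∀ p ∈ l2, p ∈ d.items ∧ pvCa p.1 = true := by
    intro p hp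
    exact ⟨List.mem_of_mem_filter hp, by simpa using List.of_mem_filter hp⟩
  have hl1mem : ∀ p ∈ l1, p ∈ d.items := fun p hp => List.mem_of_mem_filter hp
  -- A side
  have hA : get_new_params_name_mapping m
      = (((PySem.Dict.mk (l1 ++ R.items)).insert "ephys.Ih.apic.linScale"
          "a.Ih_linScale").insert "ephys.Ih.apic.max_g" "a.Ih_max").items := by
    simp only [get_new_params_name_mapping]
    rw [← hd]
    have hkeys : d.keys.filter (fun key => PySem.Str.isIn "CaDynamics_E2" key)
        = l2.map (·.1) := by
      rw [PySem.Dict.keys, List.filter_map]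
      rfl
    rw [hkeys]
    rw [List.map_map, List.map_map, List.map_map, List.zip_map']
    simp only [Function.comp_def]
    rw [show (fun a : String × String =>
        (a.1, PySem.Str.join "."
          (PySem.List.pySetD ((PySem.Str.split? a.1 ".").getD []) 1 "CaDynamics_E2_v2")))
      = (fun p : String × String => (p.1, pvRen p.1)) from rfl]
    have hinit : d = PySem.Dict.mk (d.items ++ (PySem.Dict.empty : PySem.Dict String String).items) := by
      apply PySem.Dict.ext; simp [PySem.Dict.empty]
    rw [hinit]
    rw [pv_A_loop l2 d.items PySem.Dict.empty hl2.symm hndi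
      (fun q hq p hp => hfreshAll q (hl2mem q hq).1 (hl2mem q hq).2 p hp)
      (by simp [PySem.Dict.empty, PySem.Dict.keys])
      (by simp [PySem.Dict.empty, PySem.Dict.keys])]
  -- B side
  have hB : get_new_params_name_mapping_alt m
      = (((PySem.Dict.mk (l1 ++ R.items)).insert "ephys.Ih.apic.linScale"
          "a.Ih_linScale").insert "ephys.Ih.apic.max_g" "a.Ih_max").items := by
    simp only [get_new_params_name_mapping_alt]
    rw [← hd]
    rw [pv_foldl_skip_then (fun p : String × String => PySem.Str.isIn "CaDynamics_E2" p.1)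
      (fun nm p => nm.insert p.1 p.2) d.items PySem.Dict.empty]
    have hdo := pv_foldl_do_then (fun p : String × String => PySem.Str.isIn "CaDynamics_E2" p.1)
      (fun (nm : PySem.Dict String String) (p : String × String) => nm.insert
        (PySem.Str.join "."
          (PySem.List.pySetD ((PySem.Str.split? p.1 ".").getD []) 1 "CaDynamics_E2_v2")) p.2)
      d.items
    rw [hdo]
    have hnodl1 : ((d.items.filter (fun p => !(PySem.Str.isIn "CaDynamics_E2" p.1))).map
        (fun p : String × String => p.1)).Nodup :=
      hndi.sublist (List.Sublist.map _ List.filter_sublist)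
    have hp1 : (d.items.filter
          (fun p => !(PySem.Str.isIn "CaDynamics_E2" p.1))).foldl
          (fun nm p => nm.insert p.1 p.2) PySem.Dict.empty
        = PySem.Dict.mk (l1 ++ (PySem.Dict.empty : PySem.Dict String String).items) := by
      apply PySem.Dict.ext
      have hf := PySem.Dict.items_foldl_insert_fresh
        (d.items.filter (fun p => !(PySem.Str.isIn "CaDynamics_E2" p.1)))
        (fun p : String × String => p.1) (fun p : String × String => p.2)
        (PySem.Dict.empty : PySem.Dict String String)
        (fun a _ => rfl) (by exact hnodl1)
      rw [hf]
      show [] ++ List.map (fun a : String × String => (a.1, a.2))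
          (List.filter (fun p => !PySem.Str.isIn "CaDynamics_E2" p.1) d.items) = l1 ++ []
      rw [List.nil_append, List.append_nil, hl1]
      simp only [Prod.mk.eta, List.map_id']
      rfl
    rw [hp1]
    rw [show (fun (nm : PySem.Dict String String) (p : String × String) => nm.insert
        (PySem.Str.join "."
          (PySem.List.pySetD ((PySem.Str.split? p.1 ".").getD []) 1 "CaDynamics_E2_v2")) p.2)
      = (fun (nm : PySem.Dict String String) (p : String × String) =>
          nm.insert (pvRen p.1) p.2) from rfl]
    rw [pv_B_push l1 (d.items.filter (fun p => PySem.Str.isIn "CaDynamics_E2" p.1))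
      PySem.Dict.empty
      (fun q hq p hp => hfreshAll q (List.mem_of_mem_filter hq)
        (by have h := List.of_mem_filter hq; exact h) p
        (hl1mem p hp))]
    rfl
  rw [hA, hB]
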